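-- pv_equiv track=rewrite | github.com/venkatachiranjeevi/algorithms | leetCode/aprilweekchallenge/assesment1.py | lengthEachScene
-- ===== SOURCE A (Python) =====
-- def lengthEachScene(inputList):
--     # WRITE YOUR CODE HERE
--     index_counter = {}
--     for index in range(len(inputList)):
--         index_counter[inputList[index]] = index
--     result = []
--     left_p = 0
--     right_p = 0
--     for index in range(len(inputList)):
--         right_p = max(right_p, index_counter[inputList[index]])
--         if right_p == index:
--             result.append(1+right_p - left_p)
--             left_p = right_p + 1
--
--     return result
-- ===== SOURCE B (Python) =====
-- def lengthEachScene(inputList):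
--     # declarative reformulation: an index i ends a scene iff no earlier element reaches past i
--     last = {c: i for i, c in enumerate(inputList)}
--     reach = [last[c] for c in inputList]
--     cuts = [i for i in range(len(inputList)) if all(r <= i for r in reach[:i + 1])]
--     return [b - a for a, b in zip([-1] + cuts, cuts)]
-- ===== Notes on version B (the rewrite author's own statement) =====
-- stated objective: alternative
-- what changed: Replaces the stateful two-pointer sweep (running max of last occurrences, cut when it equals the index) by a declarative characterization: an index i ends a scene iff nothing in the prefix up to i reaches past i; cut indices are collected by a comprehension and scene lengths are consecutive differences of the cut list.
import Mathlib
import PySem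

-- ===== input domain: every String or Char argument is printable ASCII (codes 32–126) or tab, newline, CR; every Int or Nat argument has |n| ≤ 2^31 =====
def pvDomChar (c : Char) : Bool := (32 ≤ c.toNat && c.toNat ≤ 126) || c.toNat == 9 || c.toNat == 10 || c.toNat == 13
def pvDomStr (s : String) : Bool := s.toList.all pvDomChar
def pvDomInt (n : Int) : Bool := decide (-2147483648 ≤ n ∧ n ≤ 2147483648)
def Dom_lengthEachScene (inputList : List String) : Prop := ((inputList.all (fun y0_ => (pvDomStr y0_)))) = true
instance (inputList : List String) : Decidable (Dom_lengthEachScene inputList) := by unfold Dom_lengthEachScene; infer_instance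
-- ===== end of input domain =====

-- B restates the scene partition declaratively (cut indices by a prefix-reach test, scene lengths as consecutive differences) instead of A's stateful two-pointer sweep; same return value, no speed claim.


-- ===== PORT A =====
def lengthEachScene (inputList : List String) : List Int :=
  -- index_counter[inputList[index]] = index  for index in range(len(inputList))
  let indexCounter : PySem.Dict String Int :=
    (PySem.List.pyRange 0 (inputList.length : Int) 1).foldl
      (fun d index => d.insert (PySem.List.pyGetD inputList index "") index) PySem.Dict.empty
  -- state = (result, left_p, right_p); dict lookup via getD is exact: every key looked up was inserted
  let st :=
    (PySem.List.pyRange 0 (inputList.length : Int) 1).foldl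
      (fun (st : List Int × Int × Int) index =>
        let right_p := max st.2.2 (indexCounter.getD (PySem.List.pyGetD inputList index "") 0)
        if right_p = index then (st.1 ++ [1 + right_p - st.2.1], (right_p + 1, right_p))
        else (st.1, (st.2.1, right_p)))
      ([], (0, 0))
  st.1

-- ===== PORT B =====
def lengthEachScene_alt (inputList : List String) : List Int :=
  -- last = {c: i for i, c in enumerate(inputList)}
  let last : PySem.Dict String Int :=
    (PySem.List.enumerate inputList 0).foldl (fun d p => d.insert p.2 p.1) PySem.Dict.empty
  -- reach = [last[c] for c in inputList]  (getD exact: every element is a key)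
  let reach := inputList.map (fun c => last.getD c 0)
  -- cuts = [i for i in range(len(inputList)) if all(r <= i for r in reach[:i+1])]
  let cuts := (PySem.List.pyRange 0 (inputList.length : Int) 1).filter
      (fun i => (PySem.List.slice reach none (some (i + 1))).all (fun r => decide (r ≤ i)))
  -- [b - a for a, b in zip([-1] + cuts, cuts)]
  (((-1 : Int) :: cuts).zip cuts).map (fun p => p.2 - p.1)

-- ===== PRECONDITION & SPEC =====
def Spec_lengthEachScene (inputList : List String) (out : List Int) : Prop := out = lengthEachScene_alt inputList
instance (inputList : List String) (out : List Int) : Decidable (Spec_lengthEachScene inputList out) := by unfold Spec_lengthEachScene; infer_instance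

-- ===== CLAIM (what is proved, stated in full; the proofs are below) =====
def Claim_equal_lengthEachScene : Prop := ∀ (inputList : List String), Dom_lengthEachScene inputList → Spec_lengthEachScene inputList (lengthEachScene inputList)

-- ===== LEMMAS AND PROOFS =====

-- A's last-occurrence dict (the same dict B builds, see pvCtr_eq_enum)
def pvCtr (xs : List String) : PySem.Dict String Int :=
  (PySem.List.pyRange 0 (xs.length : Int) 1).foldl
    (fun d index => d.insert (PySem.List.pyGetD xs index "") index) PySem.Dict.empty

-- the looked-up reach value at index k
def pvR (xs : List String) (k : Nat) : Int := (pvCtr xs).getD (xs.getD k "") 0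

-- B's cut test at index i
def pvGood (xs : List String) (i : Int) : Bool :=
  ((xs.map (fun c => (pvCtr xs).getD c 0)).take (i.toNat + 1)).all (fun r => decide (r ≤ i))

-- cut indices below m
def pvCuts (xs : List String) (m : Nat) : List Int :=
  (PySem.List.pyRange 0 (m : Int) 1).filter (pvGood xs)

-- consecutive differences
def pvDz (prev : Int) : List Int → List Int
  | [] => []
  | c :: cs => (c - prev) :: pvDz c cs

-- A's running max after processing indices < m
def pvMx (xs : List String) (m : Nat) : Int :=
  (PySem.List.pyRange 0 (m : Int) 1).foldl
    (fun a j => max a ((pvCtr xs).getD (PySem.List.pyGetD xs j "") 0)) 0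

lemma pvCtr_eq_enum (xs : List String) :
    pvCtr xs = (PySem.List.enumerate xs 0).foldl (fun d p => d.insert p.2 p.1) PySem.Dict.empty := by
  rw [PySem.List.enumerate_eq_map_pyRange (d := ""), List.foldl_map]
  simp [pvCtr, PySem.List.len]

lemma pvFold_getD_notmem (xs : List String) (s : Int) (d : PySem.Dict String Int) (c : String)
    (hc : c ∉ xs) :
    ((PySem.List.enumerate xs s).foldl (fun d p => d.insert p.2 p.1) d).getD c 0 = d.getD c 0 := by
  induction xs generalizing s d with
  | nil => simp [PySem.List.enumerate_nil]
  | cons x t ih =>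
    rw [PySem.List.enumerate_cons, List.foldl_cons]
    rw [ih (s+1) _ (fun h => hc (List.mem_cons_of_mem _ h))]
    exact PySem.Dict.getD_insert_of_ne _ _ _ (fun h => hc (h ▸ List.mem_cons_self))

lemma pvFold_getD_ge (xs : List String) (s : Int) (d : PySem.Dict String Int) (k : Nat)
    (hk : k < xs.length) :
    s + (k : Int) ≤ ((PySem.List.enumerate xs s).foldl (fun d p => d.insert p.2 p.1) d).getD (xs.getD k "") 0 := by
  induction xs generalizing s d k with
  | nil => simp at hk
  | cons x t ih =>
    rw [PySem.List.enumerate_cons, List.foldl_cons]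
    cases k with
    | zero =>
      simp only [List.getD_cons_zero, Nat.cast_zero, add_zero]
      by_cases hx : x ∈ t
      · obtain ⟨k', hk', hxk⟩ := List.mem_iff_getElem.mp hx
        have := ih (s+1) (d.insert x s) k' hk'
        rw [List.getD_eq_getElem t "" hk', hxk] at this
        omega
      · rw [pvFold_getD_notmem t _ _ x hx, PySem.Dict.getD_insert_self]
    | succ j =>
      simp only [List.getD_cons_succ]
      have := ih (s+1) (d.insert x s) j (by simpa using hk)
      push_cast
      push_cast at this
      omega

lemma pvR_ge (xs : List String) (k : Nat) (hk : k < xs.length) : (k : Int) ≤ pvR xs k := by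
  have := pvFold_getD_ge xs 0 PySem.Dict.empty k hk
  rw [← pvCtr_eq_enum] at this
  simpa [pvR] using this

lemma pvZip_eq_dz (cs : List Int) (prev : Int) :
    (((prev :: cs).zip cs).map (fun p => p.2 - p.1)) = pvDz prev cs := by
  induction cs generalizing prev with
  | nil => rfl
  | cons c cs ih => simp [List.zip, pvDz, ← ih c]

lemma pvDz_append (cs : List Int) (prev m : Int) :
    pvDz prev (cs ++ [m]) = pvDz prev cs ++ [m - cs.getLastD prev] := by
  induction cs generalizing prev with
  | nil => rfl
  | cons c cs ih => simp only [List.cons_append, pvDz, ih, List.getLastD_cons]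

lemma pvMx_succ (xs : List String) (m : Nat) :
    pvMx xs (m + 1) = max (pvMx xs m) ((pvCtr xs).getD (PySem.List.pyGetD xs (m : Int) "") 0) := by
  unfold pvMx
  push_cast
  rw [PySem.List.pyRange_one_succ_right (by positivity), List.foldl_append]
  rfl

lemma pvMx_props (xs : List String) (m : Nat) :
    0 ≤ pvMx xs m ∧ (∀ j : Nat, j < m → pvR xs j ≤ pvMx xs m) ∧
      (∀ c : Int, 0 ≤ c → (∀ j : Nat, j < m → pvR xs j ≤ c) → pvMx xs m ≤ c) := by
  induction m with
  | zero =>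
    refine ⟨?_, ?_, ?_⟩ <;> simp [pvMx, PySem.List.pyRange_one_eq_nil]
  | succ m ih =>
    obtain ⟨h0, hub, hlub⟩ := ih
    rw [pvMx_succ]
    have hr : (pvCtr xs).getD (PySem.List.pyGetD xs (m : Int) "") 0 = pvR xs m := by
      simp [pvR, PySem.List.pyGetD_natCast]
    rw [hr]
    refine ⟨le_trans h0 (le_max_left _ _), ?_, ?_⟩
    · intro j hj
      rcases Nat.lt_succ_iff_lt_or_eq.mp hj with h | h
      · exact le_trans (hub j h) (le_max_left _ _)
      · subst h; exact le_max_right _ _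
    · intro c hc hall
      exact max_le (hlub c hc (fun j hj => hall j (Nat.lt_succ_of_lt hj))) (hall m (Nat.lt_succ_self m))

lemma pvGood_iff (xs : List String) (m : Nat) (hm : m < xs.length) :
    pvGood xs (m : Int) = true ↔ ∀ k : Nat, k ≤ m → pvR xs k ≤ (m : Int) := by
  unfold pvGood
  rw [← List.map_take, List.all_eq_true]
  simp only [List.mem_map, Int.toNat_natCast, decide_eq_true_eq]
  constructor
  · intro h k hk
    have hkl : k < xs.length := lt_of_le_of_lt hk hm
    have hmem : xs[k] ∈ xs.take (m + 1) := by
      rw [List.mem_take_iff_getElem]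
      exact ⟨k, by simp [hkl]; omega, by simp⟩
    have := h _ ⟨xs[k], hmem, rfl⟩
    simpa [pvR, List.getD_eq_getElem?, List.getElem?_eq_getElem hkl] using this
  · rintro h r ⟨c, hc, rfl⟩
    rw [List.mem_take_iff_getElem] at hc
    obtain ⟨k, hk, rfl⟩ := hc
    have hkl : k < xs.length := by simp at hk; omega
    have := h k (by simp [hkl] at hk; omega)
    simpa [pvR, List.getD_eq_getElem?, List.getElem?_eq_getElem hkl] using this

lemma pvCuts_succ (xs : List String) (m : Nat) :
    pvCuts xs (m + 1) = pvCuts xs m ++ if pvGood xs (m : Int) then [(m : Int)] else [] := by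
  unfold pvCuts
  push_cast
  rw [PySem.List.pyRange_one_succ_right (by positivity), List.filter_append]
  cases h : pvGood xs (m : Int) <;> simp [List.filter, h]

lemma pvMain_inv (xs : List String) (m : Nat) (hm : m ≤ xs.length) :
    (PySem.List.pyRange 0 (m : Int) 1).foldl
      (fun (st : List Int × Int × Int) index =>
        let right_p := max st.2.2 ((pvCtr xs).getD (PySem.List.pyGetD xs index "") 0)
        if right_p = index then (st.1 ++ [1 + right_p - st.2.1], (right_p + 1, right_p))
        else (st.1, (st.2.1, right_p)))
      ([], (0, 0))
    = (pvDz (-1) (pvCuts xs m), ((pvCuts xs m).getLastD (-1) + 1, pvMx xs m)) := by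
  induction m with
  | zero =>
    simp [PySem.List.pyRange_one_eq_nil, pvCuts, pvMx, pvDz]
  | succ m ih =>
    have hmn : m < xs.length := hm
    push_cast
    rw [PySem.List.pyRange_one_succ_right (by positivity), List.foldl_append,
      ih (le_of_lt hmn), List.foldl_cons, List.foldl_nil]
    have hrm : (pvCtr xs).getD (PySem.List.pyGetD xs ((m : Nat) : Int) "") 0 = pvR xs m := by
      simp [pvR, PySem.List.pyGetD_natCast]
    have hge : (m : Int) ≤ pvR xs m := pvR_ge xs m hmn
    obtain ⟨hmx0, hmxub, hmxlub⟩ := pvMx_props xs m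
    show (let right_p := max (pvMx xs m) ((pvCtr xs).getD (PySem.List.pyGetD xs ((m : Nat) : Int) "") 0);
          if right_p = ((m : Nat) : Int) then
            (pvDz (-1) (pvCuts xs m) ++ [1 + right_p - ((pvCuts xs m).getLastD (-1) + 1)], (right_p + 1, right_p))
          else (pvDz (-1) (pvCuts xs m), ((pvCuts xs m).getLastD (-1) + 1, right_p)))
        = (pvDz (-1) (pvCuts xs (m + 1)), ((pvCuts xs (m + 1)).getLastD (-1) + 1, pvMx xs (m + 1)))
    rw [pvCuts_succ, pvMx_succ, hrm]
    by_cases hg : pvGood xs (m : Int) = true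
    · have hall := (pvGood_iff xs m hmn).mp hg
      have hrme : pvR xs m = (m : Int) := le_antisymm (hall m le_rfl) hge
      have hmxle : pvMx xs m ≤ (m : Int) := hmxlub _ (by positivity) (fun j hj => hall j (le_of_lt hj))
      have hmax : max (pvMx xs m) (pvR xs m) = (m : Int) := by
        rw [hrme]; exact max_eq_right hmxle
      simp only [hg, if_true, hmax]
      rw [pvDz_append, List.getLastD_concat]
      have harith : 1 + (m : Int) - ((pvCuts xs m).getLastD (-1) + 1) = (m : Int) - (pvCuts xs m).getLastD (-1) := by ring
      rw [harith]
    · simp only [hg]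
      have hex : ∃ k : Nat, k ≤ m ∧ (m : Int) < pvR xs k := by
        by_contra hc
        push Not at hc
        exact hg ((pvGood_iff xs m hmn).mpr (fun k hk => hc k hk))
      obtain ⟨k, hk, hkgt⟩ := hex
      have hne : max (pvMx xs m) (pvR xs m) ≠ ((m : Nat) : Int) := by
        have : pvR xs k ≤ max (pvMx xs m) (pvR xs m) := by
          rcases Nat.lt_or_ge k m with h | h
          · exact le_trans (hmxub k h) (le_max_left _ _)
          · have : k = m := le_antisymm hk h
            subst this
            exact le_max_right _ _
        omega
      simp only [hne, if_false]
      simp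

lemma pvA_eq (xs : List String) : lengthEachScene xs = pvDz (-1) (pvCuts xs xs.length) := by
  show ((PySem.List.pyRange 0 (xs.length : Int) 1).foldl
      (fun (st : List Int × Int × Int) index =>
        let right_p := max st.2.2 ((pvCtr xs).getD (PySem.List.pyGetD xs index "") 0)
        if right_p = index then (st.1 ++ [1 + right_p - st.2.1], (right_p + 1, right_p))
        else (st.1, (st.2.1, right_p)))
      ([], (0, 0))).1 = _
  rw [pvMain_inv xs xs.length le_rfl]

lemma pvB_eq (xs : List String) : lengthEachScene_alt xs = pvDz (-1) (pvCuts xs xs.length) := by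
  simp only [lengthEachScene_alt]
  rw [← pvCtr_eq_enum]
  have hc : (PySem.List.pyRange 0 (xs.length : Int) 1).filter
      (fun i => (PySem.List.slice (xs.map (fun c => (pvCtr xs).getD c 0)) none (some (i + 1))).all
        (fun r => decide (r ≤ i))) = pvCuts xs xs.length := by
    unfold pvCuts
    apply List.filter_congr
    intro i hi
    have h0 : 0 ≤ i := (PySem.List.mem_pyRange_one.mp hi).1
    rw [PySem.List.slice_to _ (by omega)]
    have ht : (i + 1).toNat = i.toNat + 1 := by omega
    rw [ht]
    rfl
  rw [hc, pvZip_eq_dz]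

-- ===== VERDICT (by name: the statement is the Claim_ definition above) =====
theorem lengthEachScene_spec : Claim_equal_lengthEachScene := by
  intro xs _
  unfold Spec_lengthEachScene
  rw [pvA_eq, pvB_eq]
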